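-- pv_equiv track=rewrite | github.com/yukiykchen/skills | kuikly-third-party/scripts/query_components.py | get_component_details
-- ===== SOURCE A (Python) =====
-- def get_component_details(data, component_name):
--     """Get detailed information about a specific component"""
--     if not data:
--         return None
--
--     # Data is directly an array of libraries
--     libraries = data if isinstance(data, list) else []
--
--     # Try exact match first
--     for lib in libraries:
--         if lib.get('componentName', '').lower() == component_name.lower():
--             return lib
--
--     # Try partial match
--     for lib in libraries:
--         if component_name.lower() in lib.get('componentName', '').lower():
--             return lib
--
--     return None
-- ===== SOURCE B (Python) =====
-- def get_component_details(data, component_name):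
--     """Get detailed information about a specific component"""
--     if not data:
--         return None
--     if not isinstance(data, list):
--         return None
--     target = component_name.lower()
--     first_partial = None
--     for lib in data:
--         name = lib.get('componentName', '').lower()
--         if name == target:
--             return lib
--         if first_partial is None and target in name:
--             first_partial = lib
--     return first_partial
-- ===== Notes on version B (the rewrite author's own statement) =====
-- stated objective: simpler
-- what changed: Replaces A's two sequential scans (exact pass, then partial pass) with one loop that returns immediately on an exact match and remembers only the first partial match as a fallback, lowering the target name once instead of per element per pass.
import Mathlib
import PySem

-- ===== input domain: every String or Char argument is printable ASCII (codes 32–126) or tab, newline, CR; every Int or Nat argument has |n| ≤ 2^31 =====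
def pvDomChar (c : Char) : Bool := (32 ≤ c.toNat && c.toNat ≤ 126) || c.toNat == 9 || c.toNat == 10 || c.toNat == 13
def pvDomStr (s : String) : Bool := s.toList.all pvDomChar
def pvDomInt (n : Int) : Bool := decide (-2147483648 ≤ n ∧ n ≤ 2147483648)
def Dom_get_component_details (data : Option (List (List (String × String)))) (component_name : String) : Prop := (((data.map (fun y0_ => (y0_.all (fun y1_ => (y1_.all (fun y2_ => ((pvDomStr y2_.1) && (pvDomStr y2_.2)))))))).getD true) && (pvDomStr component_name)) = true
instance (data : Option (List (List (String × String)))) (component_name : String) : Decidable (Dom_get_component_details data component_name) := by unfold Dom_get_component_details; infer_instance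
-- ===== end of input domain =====

-- B replaces A's two sequential scans (exact pass, then partial pass) with one loop that
-- returns on an exact match and remembers only the first partial match as a fallback (simpler).

-- ===== PORT A =====
-- lib.get('componentName', '').lower()
def pvLibName (lib : List (String × String)) : String :=
  PySem.Str.lower (PySem.Dict.getD (PySem.Dict.mk lib) "componentName" "")

def get_component_details (data : Option (List (List (String × String)))) (component_name : String) : Option (List (String × String)) :=
  match data with
  | none => none
  | some libraries =>
    if libraries = [] then none
    else
      -- exact-match pass (first 'for' loop with early return)
      match libraries.find? (fun lib => pvLibName lib == PySem.Str.lower component_name) with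
      | some lib => some lib
      | none =>
        -- partial-match pass (second 'for' loop)
        libraries.find? (fun lib => PySem.Str.isIn (PySem.Str.lower component_name) (pvLibName lib))

-- ===== PORT B =====
-- one loop: return on exact match, remember the first partial match
def pvAltLoop (target : String) (first_partial : Option (List (String × String))) :
    List (List (String × String)) → Option (List (String × String))
  | [] => first_partial
  | lib :: rest =>
    let name := pvLibName lib
    if name == target then some lib
    else pvAltLoop target
      (if first_partial.isNone && PySem.Str.isIn target name then some lib else first_partial) rest

def get_component_details_alt (data : Option (List (List (String × String)))) (component_name : String) : Option (List (String × String)) :=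
  match data with
  | none => none
  | some libraries =>
    if libraries = [] then none
    else pvAltLoop (PySem.Str.lower component_name) none libraries

-- ===== PRECONDITION & SPEC =====
def Spec_get_component_details (data : Option (List (List (String × String)))) (component_name : String) (out : Option (List (String × String))) : Prop := out = get_component_details_alt data component_name
instance (data : Option (List (List (String × String)))) (component_name : String) (out : Option (List (String × String))) : Decidable (Spec_get_component_details data component_name out) := by unfold Spec_get_component_details; infer_instance

-- ===== CLAIM (what is proved, stated in full; the proofs are below) =====
def Claim_equal_get_component_details : Prop := ∀ (data : Option (List (List (String × String)))) (component_name : String), Dom_get_component_details data component_name → Spec_get_component_details data component_name (get_component_details data component_name)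

-- ===== LEMMAS AND PROOFS =====
theorem pvAltLoop_eq (target : String) (fp : Option (List (String × String)))
    (libs : List (List (String × String))) :
    pvAltLoop target fp libs =
      match libs.find? (fun lib => pvLibName lib == target) with
      | some lib => some lib
      | none =>
        match fp with
        | some f => some f
        | none => libs.find? (fun lib => PySem.Str.isIn target (pvLibName lib)) := by
  induction libs generalizing fp with
  | nil => cases fp <;> simp [pvAltLoop, List.find?]
  | cons lib rest ih =>
    simp only [pvAltLoop, List.find?]
    by_cases hx : pvLibName lib == target
    · simp [hx]
    · simp only [hx, Bool.false_eq_true, if_false]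
      rw [ih]
      cases fp with
      | some f => simp
      | none =>
        rcases hp : PySem.Chars.isIn target.toList (pvLibName lib).toList <;>
          simp [PySem.Str.isIn, hp]

theorem get_component_details_spec : Claim_equal_get_component_details := by
  intro data component_name _
  unfold Spec_get_component_details get_component_details get_component_details_alt
  cases data with
  | none => rfl
  | some libraries =>
    by_cases h : libraries = []
    · simp [h]
    · simp only [h, if_false]
      rw [pvAltLoop_eq]
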